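-- pv_equiv track=rewrite | github.com/hlim1/JITCompilerIRViz | src/NodeToOpcode.py | get_op
-- ===== SOURCE A (Python) =====
-- def get_op(rw_insts: list):
--     """
--     """
--
--     opcode = None
--     op_address = None
--     for inst in rw_insts:
--         if inst[0] == "mw":
--             opcode = inst[2]
--         elif inst[0] == "r" and inst[1] == "rdi":
--             op_address = inst[2]
--
--     return opcode, op_address
-- ===== SOURCE B (Python) =====
-- def get_op(rw_insts: list):
--     mw = [inst[2] for inst in rw_insts if inst[0] == "mw"]
--     rdi = [inst[2] for inst in rw_insts if inst[0] == "r" and inst[1] == "rdi"]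
--     opcode = mw[-1] if mw else None
--     op_address = rdi[-1] if rdi else None
--     return opcode, op_address
-- ===== Notes on version B (the rewrite author's own statement) =====
-- stated objective: simpler
-- what changed: B replaces A's single stateful overwrite loop by two independent filtering comprehensions (one per category) whose last element is taken, eliminating the mutable pair state.
import Mathlib
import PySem

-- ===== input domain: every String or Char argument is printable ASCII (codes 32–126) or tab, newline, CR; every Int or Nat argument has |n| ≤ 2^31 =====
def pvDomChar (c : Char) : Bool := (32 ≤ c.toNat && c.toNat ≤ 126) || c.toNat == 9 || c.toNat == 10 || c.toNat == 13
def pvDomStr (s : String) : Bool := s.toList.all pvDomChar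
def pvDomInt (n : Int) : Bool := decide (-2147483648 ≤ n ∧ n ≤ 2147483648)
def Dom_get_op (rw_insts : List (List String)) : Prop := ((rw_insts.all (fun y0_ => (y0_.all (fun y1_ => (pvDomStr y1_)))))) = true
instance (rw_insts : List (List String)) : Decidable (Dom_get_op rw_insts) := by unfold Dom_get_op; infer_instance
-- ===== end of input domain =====

-- B replaces A's stateful overwrite loop by two independent filtering passes whose last element is taken (simpler decomposition, same O(n) cost).


-- ===== PORT A =====
-- one iteration of A's loop: overwrite opcode on "mw", op_address on "r"/"rdi"
def getOpStepA (st : Option String × Option String) (inst : List String) :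
    Option String × Option String :=
  if PySem.List.pyGet? inst 0 = some "mw" then (PySem.List.pyGet? inst 2, st.2)
  else if PySem.List.pyGet? inst 0 = some "r" ∧ PySem.List.pyGet? inst 1 = some "rdi" then
    (st.1, PySem.List.pyGet? inst 2)
  else st

def get_op (rw_insts : List (List String)) : Option String × Option String :=
  rw_insts.foldl getOpStepA (none, none)

-- ===== PORT B =====
-- the comprehension [inst[2] for inst in rw_insts if inst[0] == "mw"]
def mwVals (rw_insts : List (List String)) : List (Option String) :=
  rw_insts.filterMap (fun inst =>
    if PySem.List.pyGet? inst 0 = some "mw" then some (PySem.List.pyGet? inst 2) else none)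

-- the comprehension [inst[2] for inst in rw_insts if inst[0] == "r" and inst[1] == "rdi"]
def rdiVals (rw_insts : List (List String)) : List (Option String) :=
  rw_insts.filterMap (fun inst =>
    if PySem.List.pyGet? inst 0 = some "r" ∧ PySem.List.pyGet? inst 1 = some "rdi"
    then some (PySem.List.pyGet? inst 2) else none)

-- 'xs[-1] if xs else None', joining the Option produced by the indexing
def get_op_alt (rw_insts : List (List String)) : Option String × Option String :=
  ((mwVals rw_insts).getLast?.join, (rdiVals rw_insts).getLast?.join)

-- ===== PRECONDITION & SPEC =====
-- Pre_ excludes exactly the inputs on which A raises IndexError: an empty instruction,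
-- an "mw" or "r"/"rdi" instruction shorter than 3, or an "r" instruction shorter than 2.
def PreInstGetOp (inst : List String) : Prop :=
  inst ≠ [] ∧
  (PySem.List.pyGet? inst 0 = some "mw" → 3 ≤ inst.length) ∧
  (PySem.List.pyGet? inst 0 = some "r" →
    2 ≤ inst.length ∧ (PySem.List.pyGet? inst 1 = some "rdi" → 3 ≤ inst.length))

def Pre_get_op (rw_insts : List (List String)) : Prop :=
  ∀ inst ∈ rw_insts, PreInstGetOp inst

instance (rw_insts : List (List String)) : Decidable (Pre_get_op rw_insts) := by
  unfold Pre_get_op PreInstGetOp; infer_instance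

def pvWitness_get_op : List (List String) :=
  [["mw", "a", "0x1"], ["r", "rdi", "0x2"], ["w", "x"]]

def Spec_get_op (rw_insts : List (List String)) (out : Option String × Option String) : Prop := out = get_op_alt rw_insts
instance (rw_insts : List (List String)) (out : Option String × Option String) : Decidable (Spec_get_op rw_insts out) := by unfold Spec_get_op; infer_instance

-- ===== CLAIM (what is proved, stated in full; the proofs are below) =====
def Claim_equal_get_op : Prop := ∀ (rw_insts : List (List String)), Dom_get_op rw_insts → Pre_get_op rw_insts → Spec_get_op rw_insts (get_op rw_insts)

-- ===== LEMMAS AND PROOFS =====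

-- last-match scans (later elements win): characterise A's fold
def lastMw : List (List String) → Option String
  | [] => none
  | x :: xs => (lastMw xs).or
      (if PySem.List.pyGet? x 0 = some "mw" then PySem.List.pyGet? x 2 else none)

def lastRdi : List (List String) → Option String
  | [] => none
  | x :: xs => (lastRdi xs).or
      (if PySem.List.pyGet? x 0 = some "r" ∧ PySem.List.pyGet? x 1 = some "rdi"
       then PySem.List.pyGet? x 2 else none)

-- inside Pre_, index 2 of a matched instruction is in range
theorem preInst_get2 {x : List String} (h3 : 3 ≤ x.length) :
    ∃ v, PySem.List.pyGet? x 2 = some v := by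
  have h2 : (2 : Int) = ((2 : Nat) : Int) := by norm_num
  rw [h2, PySem.List.pyGet?_natCast]
  exact ⟨x[2], List.getElem?_eq_getElem (by omega)⟩

theorem preInst_mw_some {x : List String} (h : PreInstGetOp x)
    (hm : PySem.List.pyGet? x 0 = some "mw") : ∃ v, PySem.List.pyGet? x 2 = some v :=
  preInst_get2 (h.2.1 hm)

theorem preInst_rdi_some {x : List String} (h : PreInstGetOp x)
    (hr : PySem.List.pyGet? x 0 = some "r") (hd : PySem.List.pyGet? x 1 = some "rdi") :
    ∃ v, PySem.List.pyGet? x 2 = some v :=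
  preInst_get2 ((h.2.2 hr).2 hd)

-- A's fold computes the last-match scans, with the incoming state as fallback
theorem foldA_eq (l : List (List String)) (st : Option String × Option String)
    (h : ∀ inst ∈ l, PreInstGetOp inst) :
    l.foldl getOpStepA st = ((lastMw l).or st.1, (lastRdi l).or st.2) := by
  induction l generalizing st with
  | nil => simp [lastMw, lastRdi]
  | cons x xs ih =>
    have hx := h x (List.mem_cons_self ..)
    have hxs : ∀ inst ∈ xs, PreInstGetOp inst := fun i hi => h i (List.mem_cons_of_mem _ hi)
    rw [List.foldl_cons]
    by_cases hm : PySem.List.pyGet? x 0 = some "mw"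
    · obtain ⟨v, hv⟩ := preInst_mw_some hx hm
      have hr : ¬ (PySem.List.pyGet? x 0 = some "r" ∧ PySem.List.pyGet? x 1 = some "rdi") := by
        rintro ⟨hr, -⟩; rw [hm] at hr; simp at hr
      have hstep : getOpStepA st x = (some v, st.2) := by simp [getOpStepA, hm, hv]
      rw [hstep, ih _ hxs]
      simp [lastMw, lastRdi, hm, hv]
    · by_cases hrd : PySem.List.pyGet? x 0 = some "r" ∧ PySem.List.pyGet? x 1 = some "rdi"
      · obtain ⟨v, hv⟩ := preInst_rdi_some hx hrd.1 hrd.2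
        have hstep : getOpStepA st x = (st.1, some v) := by simp [getOpStepA, hrd, hv]
        rw [hstep, ih _ hxs]
        simp [lastMw, lastRdi, hrd, hv]
      · have hstep : getOpStepA st x = st := by simp [getOpStepA, hm, hrd]
        rw [hstep, ih _ hxs]
        simp [lastMw, lastRdi, hm, hrd]

-- generic: last of a filterMap of some-valued hits equals the last-match scan
theorem getLast?_join_filterMap (p : List String → Prop) [DecidablePred p]
    (l : List (List String))
    (hsome : ∀ x ∈ l, p x → ∃ v, PySem.List.pyGet? x 2 = some v) :
    (l.filterMap (fun x => if p x then some (PySem.List.pyGet? x 2) else none)).getLast?.join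
      = l.foldr (fun x acc => acc.or (if p x then PySem.List.pyGet? x 2 else none)) none := by
  induction l with
  | nil => rfl
  | cons x xs ih =>
    have hxs : ∀ y ∈ xs, p y → ∃ v, PySem.List.pyGet? y 2 = some v :=
      fun y hy => hsome y (List.mem_cons_of_mem _ hy)
    rw [List.foldr_cons, ← ih hxs]
    by_cases hp : p x
    · obtain ⟨v, hv⟩ := hsome x (List.mem_cons_self ..) hp
      simp only [List.filterMap_cons, if_pos hp]
      cases hrest : xs.filterMap (fun x => if p x then some (PySem.List.pyGet? x 2) else none) with
      | nil => simp [hv]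
      | cons a t =>
        -- the last element of the filtered tail is itself a `some` value under hsome
        cases ho : (a :: t).getLast? with
        | none => simp [List.getLast?_eq_none_iff] at ho
        | some o =>
          have homem : o ∈ a :: t := List.mem_of_getLast? ho
          rw [← hrest] at homem
          obtain ⟨y, hy, hyo⟩ := List.mem_filterMap.mp homem
          by_cases hpy : p y
          · rw [if_pos hpy] at hyo
            obtain ⟨w, hw⟩ := hsome y (List.mem_cons_of_mem _ hy) hpy
            have how : o = some w := by rw [← Option.some_inj.mp hyo, hw]
            simp [ho, how]
          · rw [if_neg hpy] at hyo; exact absurd hyo (by simp)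
    · simp [hp]

theorem mwVals_last (l : List (List String)) (h : ∀ inst ∈ l, PreInstGetOp inst) :
    (mwVals l).getLast?.join = lastMw l := by
  unfold mwVals
  rw [getLast?_join_filterMap (fun x => PySem.List.pyGet? x 0 = some "mw") l
    (fun x hx hp => preInst_mw_some (h x hx) hp)]
  induction l with
  | nil => rfl
  | cons x xs ih =>
    rw [List.foldr_cons, lastMw,
      ih (fun i hi => h i (List.mem_cons_of_mem _ hi))]

theorem rdiVals_last (l : List (List String)) (h : ∀ inst ∈ l, PreInstGetOp inst) :
    (rdiVals l).getLast?.join = lastRdi l := by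
  unfold rdiVals
  rw [getLast?_join_filterMap
    (fun x => PySem.List.pyGet? x 0 = some "r" ∧ PySem.List.pyGet? x 1 = some "rdi") l
    (fun x hx hp => preInst_rdi_some (h x hx) hp.1 hp.2)]
  induction l with
  | nil => rfl
  | cons x xs ih =>
    rw [List.foldr_cons, lastRdi,
      ih (fun i hi => h i (List.mem_cons_of_mem _ hi))]

-- ===== VERDICT (by name: the statement is the Claim_ definition above) =====
theorem get_op_spec : Claim_equal_get_op := by
  intro l _ hpre
  unfold Spec_get_op get_op get_op_alt
  rw [foldA_eq l _ hpre, mwVals_last l hpre, rdiVals_last l hpre]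
  simp
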